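-- pv_equiv track=rewrite | github.com/RakeshRamkhelawan/sanskritisetu-backend | cva_agent.py | _is_english_response
-- ===== SOURCE A (Python) =====
-- def _is_english_response(text: str) -> bool:
--     """Check if response is in English by looking for common English patterns"""
--     english_indicators = [
--         "I'm", "I am", "you're", "you are", "we're", "we are", "they're", "they are",
--         "strategic", "analysis", "approach", "consider", "evaluate", "implementation",
--         "Understanding of the situation", "Strategic analysis", "Recommended approach",
--         "excited to", "delighted to", "happy to", "glad to"
--     ]
--     text_lower = text.lower()
--     english_count = sum(1 for indicator in english_indicators if indicator.lower() in text_lower)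
--     return english_count >= 1  # If 1+ English indicators, assume it's English
-- ===== SOURCE B (Python) =====
-- # One left-to-right scan over the text: at each position test whether some
-- # (pre-lowered) indicator starts there, instead of one substring search per indicator.
-- ENGLISH_INDICATORS = (
--     "i'm", "i am", "you're", "you are", "we're", "we are", "they're", "they are",
--     "strategic", "analysis", "approach", "consider", "evaluate", "implementation",
--     "understanding of the situation", "strategic analysis", "recommended approach",
--     "excited to", "delighted to", "happy to", "glad to",
-- )
--
-- def _is_english_response(text: str) -> bool:
--     t = text.lower()
--     for i in range(len(t)):
--         for ind in ENGLISH_INDICATORS: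
--             if t.startswith(ind, i):
--                 return True
--     return False
-- ===== Notes on version B (the rewrite author's own statement) =====
-- stated objective: alternative
-- what changed: A loops over the 21 indicators doing one full substring search of the lowered text each; B makes a single left-to-right scan over the text, testing at each position whether any pre-lowered indicator starts there (position-outer instead of indicator-outer traversal).
import Mathlib
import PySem

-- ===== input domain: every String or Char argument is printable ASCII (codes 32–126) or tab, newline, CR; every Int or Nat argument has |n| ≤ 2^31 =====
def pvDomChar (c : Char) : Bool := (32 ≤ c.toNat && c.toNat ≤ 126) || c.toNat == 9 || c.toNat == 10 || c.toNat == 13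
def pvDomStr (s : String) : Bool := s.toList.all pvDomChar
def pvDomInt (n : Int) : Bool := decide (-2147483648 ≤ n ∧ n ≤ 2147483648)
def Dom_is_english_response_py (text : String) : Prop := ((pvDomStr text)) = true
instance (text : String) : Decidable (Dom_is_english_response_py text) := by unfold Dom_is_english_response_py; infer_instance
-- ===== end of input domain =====

-- B replaces A's per-indicator substring searches by one left-to-right scan of the
-- text that tests at each position whether any pre-lowered indicator starts there
-- (objective: alternative traversal, same cost class).

-- ===== PORT A =====
def pvIndicatorsA : List String :=
  ["I'm", "I am", "you're", "you are", "we're", "we are", "they're", "they are",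
   "strategic", "analysis", "approach", "consider", "evaluate", "implementation",
   "Understanding of the situation", "Strategic analysis", "Recommended approach",
   "excited to", "delighted to", "happy to", "glad to"]

def is_english_response_py (text : String) : Bool :=
  let text_lower := PySem.Str.lower text
  let english_count : Nat :=
    pvIndicatorsA.foldl
      (fun n indicator =>
        if PySem.Str.isIn (PySem.Str.lower indicator) text_lower then n + 1 else n) 0
  decide (1 ≤ english_count)

-- ===== PORT B =====
def pvIndicatorsB : List String :=
  ["i'm", "i am", "you're", "you are", "we're", "we are", "they're", "they are",
   "strategic", "analysis", "approach", "consider", "evaluate", "implementation",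
   "understanding of the situation", "strategic analysis", "recommended approach",
   "excited to", "delighted to", "happy to", "glad to"]

-- the position loop: at each suffix (= position i of the lowered text), test every indicator
def pvScan (inds : List (List Char)) : List Char → Bool
  | [] => false
  | c :: rest =>
    inds.any (fun ind => PySem.Chars.startswith (c :: rest) ind) || pvScan inds rest

def is_english_response_py_alt (text : String) : Bool :=
  pvScan (pvIndicatorsB.map String.toList) (PySem.Str.lower text).toList

-- ===== PRECONDITION & SPEC =====
def Spec_is_english_response_py (text : String) (out : Bool) : Prop := out = is_english_response_py_alt text
instance (text : String) (out : Bool) : Decidable (Spec_is_english_response_py text out) := by unfold Spec_is_english_response_py; infer_instance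

-- ===== CLAIM (what is proved, stated in full; the proofs are below) =====
def Claim_equal_is_english_response_py : Prop := ∀ (text : String), Dom_is_english_response_py text → Spec_is_english_response_py text (is_english_response_py text)

-- ===== LEMMAS AND PROOFS =====

-- A's counting loop is countP
theorem pv_foldl_count (p : String → Bool) (l : List String) (n : Nat) :
    l.foldl (fun n ind => if p ind then n + 1 else n) n = n + l.countP p := by
  induction l generalizing n with
  | nil => simp
  | cons x t ih =>
    by_cases h : p x <;> simp [List.foldl_cons, h, ih]; omega

-- B's scan finds exactly the patterns that start at some nonempty suffix
theorem pv_pvScan_iff (inds : List (List Char)) (l : List Char) :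
    pvScan inds l = true ↔ ∃ ind ∈ inds, ∃ s, s <:+ l ∧ s ≠ [] ∧ ind <+: s := by
  induction l with
  | nil =>
    simp only [pvScan]
    constructor
    · intro h; cases h
    · rintro ⟨ind, _, s, hs, hne, _⟩
      exact absurd (List.suffix_nil.mp hs) hne
  | cons c rest ih =>
    simp only [pvScan, Bool.or_eq_true, List.any_eq_true, PySem.Chars.startswith_iff, ih]
    constructor
    · rintro (⟨ind, hmem, hp⟩ | ⟨ind, hmem, s, hs, hne, hp⟩)
      · exact ⟨ind, hmem, c :: rest, List.suffix_refl _, by simp, hp⟩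
      · exact ⟨ind, hmem, s, hs.trans (List.suffix_cons c rest), hne, hp⟩
    · rintro ⟨ind, hmem, s, hs, hne, hp⟩
      rcases (List.suffix_cons_iff.mp hs) with heq | hs'
      · exact Or.inl ⟨ind, hmem, heq ▸ hp⟩
      · exact Or.inr ⟨ind, hmem, s, hs', hne, hp⟩

-- for nonempty patterns, membership as a substring = a prefix of some nonempty suffix
theorem pv_infix_iff (ind l : List Char) (h : ind ≠ []) :
    ind <:+: l ↔ ∃ s, s <:+ l ∧ s ≠ [] ∧ ind <+: s := by
  rw [List.infix_iff_prefix_suffix]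
  constructor
  · rintro ⟨t, hp, hs⟩
    refine ⟨t, hs, ?_, hp⟩
    rintro rfl; exact h (List.prefix_nil.mp hp)
  · rintro ⟨s, hs, _, hp⟩
    exact ⟨s, hp, hs⟩

-- the lowered A-indicators are exactly the B-indicators
theorem pv_inds_eq :
    pvIndicatorsA.map (fun s => (PySem.Str.lower s).toList) = pvIndicatorsB.map String.toList := by
  decide

theorem pv_indsB_ne_nil : ∀ ind ∈ pvIndicatorsB.map String.toList, ind ≠ [] := by decide

-- ===== VERDICT (by name: the statement is the Claim_ definition above) =====
theorem is_english_response_py_spec : Claim_equal_is_english_response_py := by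
  intro text _
  unfold Spec_is_english_response_py is_english_response_py is_english_response_py_alt
  rw [Bool.eq_iff_iff]
  simp only [decide_eq_true_eq, pv_foldl_count, Nat.zero_add, Nat.one_le_iff_ne_zero,
    ← Nat.pos_iff_ne_zero, List.countP_pos_iff, pv_pvScan_iff]
  constructor
  · rintro ⟨indicator, hmem, hin⟩
    have hmem' : (PySem.Str.lower indicator).toList ∈ pvIndicatorsB.map String.toList := by
      rw [← pv_inds_eq]; exact List.mem_map_of_mem hmem
    have hne := pv_indsB_ne_nil _ hmem'
    have hinf : (PySem.Str.lower indicator).toList <:+: (PySem.Str.lower text).toList :=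
      (PySem.Str.isIn_iff_infix _ _).mp hin
    rcases (pv_infix_iff _ _ hne).mp hinf with ⟨s, hs, hsne, hp⟩
    exact ⟨_, hmem', s, hs, hsne, hp⟩
  · rintro ⟨ind, hmem, s, hs, hsne, hp⟩
    have hne := pv_indsB_ne_nil _ hmem
    rw [← pv_inds_eq] at hmem
    rcases List.mem_map.mp hmem with ⟨indicator, hmemA, rfl⟩
    refine ⟨indicator, hmemA, (PySem.Str.isIn_iff_infix _ _).mpr ?_⟩
    exact (pv_infix_iff _ _ hne).mpr ⟨s, hs, hsne, hp⟩
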